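-- pv_equiv track=rewrite | github.com/CyriaqueCCN/404CTF | reverse/renv_tour_1/solve.py | tour3
-- ===== SOURCE A (Python) =====
-- def tour3(password):
--     mdp = [
--         "l",
--         "x",
--         "i",
--         "b",
--         "i",
--         "i",
--         "q",
--         "u",
--         "d",
--         "v",
--         "a",
--         "v",
--         "b",
--         "n",
--         "l",
--         "v",
--         "v",
--         "l",
--         "g",
--         "z",
--         "q",
--         "g",
--         "i",
--         "u",
--         "d",
--         "u",
--         "d",
--         "j",
--         "o",
--         "r",
--         "y",
--         "r",
--         "u",
--         "a",
--     ]
--     for i in range(len(password)):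
--         mdp[i], mdp[len(password) - i - 1] = chr(
--             password[len(password) - i - 1] + i % 4
--         ), chr(password[i] + i % 4)
--     return "".join(mdp)
-- ===== SOURCE B (Python) =====
-- def tour3(password):
--     # Position p of the result finally holds password[n-1-p] shifted by max(p, n-1-p) % 4;
--     # positions >= n keep the preset letters. No mutable buffer: map + slice.
--     preset = "lxibiiqudvavbnlvvlgzqgiududjoryrua"
--     n = len(password)
--     scrambled = [chr(c + max(p, n - 1 - p) % 4) for p, c in enumerate(reversed(password))]
--     return "".join(scrambled) + preset[n:]
-- ===== Notes on version B (the rewrite author's own statement) =====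
-- stated objective: simpler
-- what changed: Replaces A's in-place loop of simultaneous pair-swap writes into a 34-slot buffer by a pure expression: map chr(c + max(p, n-1-p) % 4) over enumerate(reversed(password)) and append the untouched preset tail preset[n:]; no mutable list at all.
import Mathlib
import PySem

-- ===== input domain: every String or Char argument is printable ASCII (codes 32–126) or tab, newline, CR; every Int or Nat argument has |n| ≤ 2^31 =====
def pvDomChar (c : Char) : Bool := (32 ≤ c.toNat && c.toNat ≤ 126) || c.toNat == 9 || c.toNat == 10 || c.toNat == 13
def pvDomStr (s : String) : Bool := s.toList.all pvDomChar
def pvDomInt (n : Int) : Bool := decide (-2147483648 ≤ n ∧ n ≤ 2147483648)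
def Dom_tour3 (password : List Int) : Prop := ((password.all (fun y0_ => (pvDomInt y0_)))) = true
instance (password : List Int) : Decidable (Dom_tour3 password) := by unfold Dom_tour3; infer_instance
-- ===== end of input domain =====

-- B drops A's mutable 34-slot buffer: it maps a closed-form formula over enumerate(reversed(password))
-- and appends the untouched preset tail (simpler decomposition, same cost).

-- ===== PORT A =====
-- the preset 34 letters (A's initial mdp list)
def presetMdp : List Char :=
  ['l','x','i','b','i','i','q','u','d','v','a','v','b','n','l','v','v',
   'l','g','z','q','g','i','u','d','u','d','j','o','r','y','r','u','a']

-- Python chr(n); exact on Pre_-admitted inputs (0 <= n, n+3 <= 0x10FFFF, outside the surrogate band)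
def pyChr (n : Int) : Char := Char.ofNat n.toNat

-- port of A: for each i, simultaneous writes mdp[i], mdp[n-i-1]; .getD 0 never fires under Pre_
def tour3 (password : List Int) : String :=
  let n := password.length
  String.mk ((List.range n).foldl (fun m i =>
    (m.set i (pyChr (((PySem.List.pyGet? password ((n : Int) - i - 1)).getD 0) + (i % 4 : Nat)))).set
      (n - 1 - i) (pyChr (((PySem.List.pyGet? password (i : Int)).getD 0) + (i % 4 : Nat)))) presetMdp)

-- ===== PORT B =====
-- port of B: map over enumerate(reversed(password)) ++ preset[n:] (Python slice s[n:], n ≥ 0, is drop n)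
def tour3_alt (password : List Int) : String :=
  let n := password.length
  String.mk (((PySem.List.enumerate password.reverse 0).map
      (fun pc => pyChr (pc.2 + PySem.Int.mod (max pc.1 ((n : Int) - 1 - pc.1)) 4)))
    ++ presetMdp.drop n)

-- ===== PRECONDITION & SPEC =====
-- Pre_ excludes: lists longer than 34 (A raises IndexError), negative or > 0x10FFFF-3 codes (chr raises
-- ValueError), and codes within 3 of the surrogate band 0xD800-0xDFFF — there A can return a string
-- containing a lone surrogate, which is not a Unicode scalar value and not representable as a Lean String.
def Pre_tour3 (password : List Int) : Prop :=
  password.length ≤ 34 ∧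
    ∀ v ∈ password, 0 ≤ v ∧ v + 3 ≤ 1114111 ∧ (v + 3 < 55296 ∨ 57344 ≤ v)
instance (password : List Int) : Decidable (Pre_tour3 password) := by unfold Pre_tour3; infer_instance

def pvWitness_tour3 : List Int := [104, 101, 108, 108, 111]

def Spec_tour3 (password : List Int) (out : String) : Prop := out = tour3_alt password
instance (password : List Int) (out : String) : Decidable (Spec_tour3 password out) := by unfold Spec_tour3; infer_instance

-- ===== CLAIM (what is proved, stated in full; the proofs are below) =====
def Claim_equal_tour3 : Prop := ∀ (password : List Int), Dom_tour3 password → Pre_tour3 password → Spec_tour3 password (tour3 password)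

-- ===== LEMMAS AND PROOFS =====

lemma getD_set (m : List Char) (i q : Nat) (a : Char) :
    (m.set i a).getD q ' ' = if q = i ∧ i < m.length then a else m.getD q ' ' := by
  simp only [List.getD_eq_getElem?_getD, List.getElem?_set]
  split_ifs <;> simp_all

lemma length_foldlA (n : Nat) (a b : Nat → Char) (m : List Char) : ∀ k,
    ((List.range k).foldl (fun m i => (m.set i (a i)).set (n - 1 - i) (b i)) m).length
      = m.length := by
  intro k
  induction k with
  | zero => rfl
  | succ k ih => rw [List.range_succ, List.foldl_append]; simp [ih]

-- element q of A's fold after the first k iterations: the last writer of q wins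
lemma foldlA_getD (n : Nat) (a b : Nat → Char) (m : List Char) (hn : n ≤ m.length) :
    ∀ k, k ≤ n → ∀ q,
    ((List.range k).foldl (fun m i => (m.set i (a i)).set (n - 1 - i) (b i)) m).getD q ' ' =
      if q < n then
        if q < k ∧ n - 1 - q < k then (if q ≤ n - 1 - q then b (n - 1 - q) else a q)
        else if q < k then a q
        else if n - 1 - q < k then b (n - 1 - q)
        else m.getD q ' '
      else m.getD q ' ' := by
  intro k
  induction k with
  | zero => intro _ q; simp
  | succ k ih =>
    intro hk q
    rw [List.range_succ, List.foldl_append]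
    simp only [List.foldl_cons, List.foldl_nil]
    rw [getD_set, getD_set]
    simp only [List.length_set, length_foldlA]
    rw [ih (by omega) q]
    split_ifs <;> first | rfl | omega | (congr 1; omega)

-- element q of B's list: scrambled prefix for q < n, preset tail afterwards
lemma Blist_getD (password : List Int) (q : Nat) :
    (((PySem.List.enumerate password.reverse 0).map
        (fun pc => pyChr (pc.2 + PySem.Int.mod (max pc.1 ((password.length : Int) - 1 - pc.1)) 4)))
      ++ presetMdp.drop password.length).getD q ' ' =
      if h : q < password.length then
        pyChr (password[password.length - 1 - q] +
          PySem.Int.mod (max (q : Int) ((password.length : Int) - 1 - q)) 4)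
      else presetMdp.getD q ' ' := by
  set n := password.length with hn
  have hL : ((PySem.List.enumerate password.reverse 0).map
      (fun pc => pyChr (pc.2 + PySem.Int.mod (max pc.1 ((n : Int) - 1 - pc.1)) 4))).length = n := by
    simp [PySem.List.length_enumerate]; omega
  rw [List.getD_eq_getElem?_getD, List.getElem?_append, hL]
  by_cases hq : q < n
  · rw [if_pos hq, dif_pos hq]
    simp only [List.getElem?_map, PySem.List.getElem?_enumerate]
    have hrev : password.reverse[q]? = some (password[n - 1 - q]'(by omega)) := by
      rw [List.getElem?_eq_getElem (by simp [← hn]; omega)]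
      congr 1
      rw [List.getElem_reverse]
    rw [hrev]
    simp [← hn]
  · rw [if_neg hq, dif_neg hq]
    rw [List.getD_eq_getElem?_getD, List.getElem?_drop]
    congr 2
    omega

lemma eq_of_getD_eq (l₁ l₂ : List Char) (hl : l₁.length = l₂.length)
    (h : ∀ q, l₁.getD q ' ' = l₂.getD q ' ') : l₁ = l₂ := by
  apply List.ext_getElem hl
  intro q h1 h2
  have := h q
  rwa [List.getD_eq_getElem _ _ h1, List.getD_eq_getElem _ _ h2] at this

-- ===== VERDICT (by name: the statement is the Claim_ definition above) =====
theorem tour3_spec : Claim_equal_tour3 := by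
  intro password _ hpre
  obtain ⟨hlen, _⟩ := hpre
  unfold Spec_tour3 tour3 tour3_alt
  simp only
  apply congrArg String.mk
  set n := password.length with hn
  have h34 : presetMdp.length = 34 := by decide
  have hnm : n ≤ presetMdp.length := by omega
  apply eq_of_getD_eq
  · rw [length_foldlA n _ _ _ n]
    simp [PySem.List.length_enumerate]
    omega
  · intro q
    rw [foldlA_getD n _ _ _ hnm n le_rfl q, Blist_getD password q]
    by_cases hq : q < n
    · have hb : q < n ∧ n - 1 - q < n := ⟨hq, by omega⟩
      rw [if_pos hq, if_pos hb, dif_pos hq]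
      rw [PySem.Int.mod_eq_emod_of_pos (by norm_num : (0:Int) < 4)]
      by_cases hle : q ≤ n - 1 - q
      · rw [if_pos hle]
        rw [PySem.List.pyGet?_natCast, List.getElem?_eq_getElem (by omega)]
        simp only [Option.getD_some]
        congr 1
        have e2 : max (q : Int) ((n : Int) - 1 - q) = ((n - 1 - q : Nat) : Int) := by omega
        rw [e2]
        push_cast
        rfl
      · rw [if_neg hle]
        have e1 : ((n : Int) - q - 1) = ((n - 1 - q : Nat) : Int) := by omega
        rw [e1, PySem.List.pyGet?_natCast, List.getElem?_eq_getElem (by omega)]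
        simp only [Option.getD_some]
        congr 1
        have e2 : max (q : Int) ((n : Int) - 1 - q) = ((q : Nat) : Int) := by omega
        rw [e2]
        push_cast
        rfl
    · rw [if_neg hq, dif_neg hq]
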